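-- pv_equiv track=rewrite | github.com/atebelskis/CodeWars-tasks | CD2.py | mobile_keyboard
-- ===== SOURCE A (Python) =====
-- def mobile_keyboard(s):
--     a = [{'1':1}, {'2':1, 'a':2, 'b':3, 'c':4}, {'3':1, 'd':2, 'e':3, 'f':4},
--         {'4':1, 'g':2, 'h':3, 'i':4}, {'5':1, 'j':2, 'k':3, 'l':4}, {'6':1, 'm':2, 'n':3, 'o':4},
--         {'7':1, 'p':2, 'q':3, 'r':4, 's':5}, {'8':1, 't':2, 'u':3, 'v':4},
--         {'9':1, 'w':2, 'x':3, 'y':4, 'z':5}]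
--     b = []
--     for el in s:
--         for i in a:
--             for x,y in i.items():
--                 if x == el:
--                     b.append(y)
--     return sum(b)
-- ===== SOURCE B (Python) =====
-- def mobile_keyboard(s):
--     total = 0
--     for c in s:
--         if '1' <= c <= '9':
--             total += 1
--         elif 'a' <= c <= 'z':
--             i = ord(c) - ord('a')
--             if i < 15:        # a..o: eight uniform groups of 3 (abc def ghi jkl mno)
--                 total += i % 3 + 2
--             elif i < 19:      # pqrs
--                 total += i - 13
--             elif i < 22:      # tuv
--                 total += i - 17
--             else:             # wxyz
--                 total += i - 20
--     return total
-- ===== Notes on version B (the rewrite author's own statement) =====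
-- stated objective: faster
-- what changed: Replaced A's table scan (triple-nested loop over nine literal dicts per character, collecting matches into a list and summing) by a table-free arithmetic formula: digits cost 1 and a letter's cost is computed from its alphabet index by group arithmetic, accumulated in one pass.
import Mathlib
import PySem

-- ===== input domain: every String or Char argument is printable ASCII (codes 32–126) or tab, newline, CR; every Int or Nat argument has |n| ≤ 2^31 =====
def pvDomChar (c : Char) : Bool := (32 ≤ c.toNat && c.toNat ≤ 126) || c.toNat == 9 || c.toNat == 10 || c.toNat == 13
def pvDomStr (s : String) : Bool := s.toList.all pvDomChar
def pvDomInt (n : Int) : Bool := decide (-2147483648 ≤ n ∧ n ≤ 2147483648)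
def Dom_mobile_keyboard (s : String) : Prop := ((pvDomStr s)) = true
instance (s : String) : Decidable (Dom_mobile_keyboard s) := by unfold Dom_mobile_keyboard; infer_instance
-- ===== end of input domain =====

-- B drops A's nine keypad tables entirely: it computes each character's press count by
-- arithmetic on the character code in one accumulator pass (objective: faster, constant factor).

-- ===== PORT A =====
-- the nine keypad dicts of A, in order
def mkTables : List (PySem.Dict Char Int) :=
  [PySem.Dict.ofList [('1', 1)],
   PySem.Dict.ofList [('2', 1), ('a', 2), ('b', 3), ('c', 4)],
   PySem.Dict.ofList [('3', 1), ('d', 2), ('e', 3), ('f', 4)],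
   PySem.Dict.ofList [('4', 1), ('g', 2), ('h', 3), ('i', 4)],
   PySem.Dict.ofList [('5', 1), ('j', 2), ('k', 3), ('l', 4)],
   PySem.Dict.ofList [('6', 1), ('m', 2), ('n', 3), ('o', 4)],
   PySem.Dict.ofList [('7', 1), ('p', 2), ('q', 3), ('r', 4), ('s', 5)],
   PySem.Dict.ofList [('8', 1), ('t', 2), ('u', 3), ('v', 4)],
   PySem.Dict.ofList [('9', 1), ('w', 2), ('x', 3), ('y', 4), ('z', 5)]]

def mobile_keyboard (s : String) : Int :=
  let a := mkTables
  let b : List Int :=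
    s.toList.foldl (fun b el =>
      a.foldl (fun b i =>
        i.items.foldl (fun b xy => if xy.1 == el then b ++ [xy.2] else b) b) b) []
  b.sum

-- ===== PORT B =====
-- Source B's per-character branch chain: digits cost 1, letters by group arithmetic, else 0
def pressCount (c : Char) : Int :=
  if '1' ≤ c ∧ c ≤ '9' then 1
  else if 'a' ≤ c ∧ c ≤ 'z' then
    let i : Int := (c.toNat : Int) - 97
    if i < 15 then PySem.Int.mod i 3 + 2
    else if i < 19 then i - 13
    else if i < 22 then i - 17
    else i - 20
  else 0

def mobile_keyboard_alt (s : String) : Int :=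
  s.toList.foldl (fun total c => total + pressCount c) 0

-- ===== PRECONDITION & SPEC =====
def Spec_mobile_keyboard (s : String) (out : Int) : Prop := out = mobile_keyboard_alt s
instance (s : String) (out : Int) : Decidable (Spec_mobile_keyboard s out) := by unfold Spec_mobile_keyboard; infer_instance

-- ===== CLAIM =====
def Claim_equal_mobile_keyboard : Prop := ∀ (s : String), Dom_mobile_keyboard s → Spec_mobile_keyboard s (mobile_keyboard s)

-- ===== LEMMAS AND PROOFS =====

-- the 41 keypad entries, in A's scan order
def flatList : List (Char × Int) :=
  [('1', 1),
   ('2', 1), ('a', 2), ('b', 3), ('c', 4),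
   ('3', 1), ('d', 2), ('e', 3), ('f', 4),
   ('4', 1), ('g', 2), ('h', 3), ('i', 4),
   ('5', 1), ('j', 2), ('k', 3), ('l', 4),
   ('6', 1), ('m', 2), ('n', 3), ('o', 4),
   ('7', 1), ('p', 2), ('q', 3), ('r', 4), ('s', 5),
   ('8', 1), ('t', 2), ('u', 3), ('v', 4),
   ('9', 1), ('w', 2), ('x', 3), ('y', 4), ('z', 5)]

-- A's contribution for one character: sum of the matching table entries
def aChar (c : Char) : Int := ((flatList.filter (fun xy => xy.1 == c)).map Prod.snd).sum

-- A's inner two loops over the nine literal tables are one fold over flatList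
lemma stepA_eq (b : List Int) (el : Char) :
    mkTables.foldl (fun b i =>
        i.items.foldl (fun b xy => if xy.1 == el then b ++ [xy.2] else b) b) b
      = flatList.foldl (fun b xy => if xy.1 == el then b ++ [xy.2] else b) b := rfl

lemma perChar (b : List Int) (el : Char) :
    (flatList.foldl (fun b xy => if xy.1 == el then b ++ [xy.2] else b) b).sum
      = b.sum + aChar el := by
  rw [PySem.List.foldl_append_if (fun xy => xy.1 == el) Prod.snd, List.sum_append]
  rfl

-- for characters beyond 'z' both per-character values are 0
lemma aChar_big (c : Char) (h : 123 ≤ c.toNat) : aChar c = 0 := by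
  have hf : flatList.filter (fun xy => xy.1 == c) = [] := by
    apply List.filter_eq_nil_iff.mpr
    intro xy hxy
    simp only [beq_iff_eq]
    intro he
    have : xy.1.toNat = c.toNat := by rw [he]
    fin_cases hxy <;> simp_all <;> omega
  simp [aChar, hf]

lemma pressCount_big (c : Char) (h : 123 ≤ c.toNat) : pressCount c = 0 := by
  unfold pressCount
  have h9 : ¬ ('1' ≤ c ∧ c ≤ '9') := by
    rintro ⟨-, hb⟩
    have h1 : c.toNat ≤ 57 := UInt32.le_iff_toNat_le.mp (Char.le_def.mp hb)
    omega
  have hz : ¬ ('a' ≤ c ∧ c ≤ 'z') := by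
    rintro ⟨-, hb⟩
    have h1 : c.toNat ≤ 122 := UInt32.le_iff_toNat_le.mp (Char.le_def.mp hb)
    omega
  simp [h9, hz]

-- for every small code the two per-character values agree (kernel evaluation)
lemma small_eq : ∀ n : Fin 123, aChar (Char.ofNat n) = pressCount (Char.ofNat n) := by decide

lemma per_char_eq (c : Char) : aChar c = pressCount c := by
  by_cases h : c.toNat < 123
  · have hv : Char.ofNat c.toNat = c := Char.ofNat_toNat c
    have := small_eq ⟨c.toNat, h⟩
    simpa [hv] using this
  · rw [aChar_big c (by omega), pressCount_big c (by omega)]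

lemma alt_sum (l : List Char) (a : Int) :
    l.foldl (fun total c => total + pressCount c) a = a + (l.map pressCount).sum := by
  induction l generalizing a with
  | nil => simp
  | cons x t ih => simp [ih]; ring

lemma main_loop (cs : List Char) (b : List Int) :
    (cs.foldl (fun b el =>
        mkTables.foldl (fun b i =>
          i.items.foldl (fun b xy => if xy.1 == el then b ++ [xy.2] else b) b) b) b).sum
      = b.sum + (cs.map pressCount).sum := by
  induction cs generalizing b with
  | nil => simp
  | cons c tl ih =>
    simp only [List.foldl_cons, List.map_cons, List.sum_cons]
    rw [ih, stepA_eq, perChar, per_char_eq]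
    ring

-- ===== VERDICT =====
theorem mobile_keyboard_spec : Claim_equal_mobile_keyboard := by
  intro s _
  show mobile_keyboard s = mobile_keyboard_alt s
  unfold mobile_keyboard mobile_keyboard_alt
  rw [main_loop s.toList [], alt_sum]
  simp
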